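-- pv_equiv track=rewrite | github.com/Lucho47S/pp_programacion1_Santa_Cruz_Luciano | funciones_base.py | buscar_valor_extremo
-- ===== SOURCE A (Python) =====
-- def buscar_valor_extremo(matriz: list[list], indice: int, modo: str) -> float:
--     """
--     Devuelve el valor máximo o mínimo de una columna según el modo elegido.
--
--     Args:
--         matriz (list[list]): matriz a recorrer
--         indice (int): índice del campo numérico a comparar
--         modo (str): 'max' para máximo o 'min' para mínimo
--
--     Returns:
--         int: valor máximo o mínimo encontrado
--     """
--     valor_extremo = matriz[0][indice]
--
--     for fila in matriz:
--         if modo == "max" and fila[indice] > valor_extremo: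
--             valor_extremo = fila[indice]
--         elif modo == "min" and fila[indice] < valor_extremo:
--             valor_extremo = fila[indice]
--
--     return int(valor_extremo)
-- ===== SOURCE B (Python) =====
-- def buscar_valor_extremo(matriz: list[list], indice: int, modo: str) -> float:
--     if modo == "max":
--         return int(sorted(fila[indice] for fila in matriz)[-1])
--     if modo == "min":
--         return int(sorted(fila[indice] for fila in matriz)[0])
--     return int(matriz[0][indice])
-- ===== Notes on version B (the rewrite author's own statement) =====
-- stated objective: alternative
-- what changed: B sorts the extracted column and picks an endpoint (last for 'max', first for 'min'), instead of A's single-pass manual extreme tracking with a per-row mode test; the invalid-mode case returns the first row's value directly.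
import Mathlib
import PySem

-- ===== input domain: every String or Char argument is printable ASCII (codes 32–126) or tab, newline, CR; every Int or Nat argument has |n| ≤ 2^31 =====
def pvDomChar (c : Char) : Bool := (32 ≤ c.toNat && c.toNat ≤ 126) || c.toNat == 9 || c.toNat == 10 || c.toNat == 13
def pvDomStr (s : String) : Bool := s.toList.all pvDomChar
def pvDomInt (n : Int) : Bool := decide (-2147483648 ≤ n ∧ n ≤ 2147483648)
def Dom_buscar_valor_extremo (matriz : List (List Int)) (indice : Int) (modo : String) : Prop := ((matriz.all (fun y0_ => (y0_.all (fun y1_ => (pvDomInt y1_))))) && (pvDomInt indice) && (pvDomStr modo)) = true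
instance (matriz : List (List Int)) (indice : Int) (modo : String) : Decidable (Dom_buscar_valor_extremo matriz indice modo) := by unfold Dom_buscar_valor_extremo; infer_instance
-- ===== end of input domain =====

-- B sorts the extracted column and picks an endpoint (last for 'max', first for 'min')
-- instead of A's single-pass manual extreme tracking; alternative algorithm, not faster.


-- ===== PORT A =====
def buscar_valor_extremo (matriz : List (List Int)) (indice : Int) (modo : String) : Int :=
  let valor_extremo :=
    (PySem.List.pyGet? ((PySem.List.pyGet? matriz 0).getD []) indice).getD 0
  matriz.foldl (fun valor_extremo fila =>
    if modo = "max" ∧ (PySem.List.pyGet? fila indice).getD 0 > valor_extremo then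
      (PySem.List.pyGet? fila indice).getD 0
    else if modo = "min" ∧ (PySem.List.pyGet? fila indice).getD 0 < valor_extremo then
      (PySem.List.pyGet? fila indice).getD 0
    else valor_extremo) valor_extremo

-- ===== PORT B =====
def buscar_valor_extremo_alt (matriz : List (List Int)) (indice : Int) (modo : String) : Int :=
  if modo = "max" then
    (PySem.List.pyGet?
      (PySem.List.sorted (matriz.map (fun fila => (PySem.List.pyGet? fila indice).getD 0))
        (fun x => x) false) (-1)).getD 0
  else if modo = "min" then
    (PySem.List.pyGet?
      (PySem.List.sorted (matriz.map (fun fila => (PySem.List.pyGet? fila indice).getD 0))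
        (fun x => x) false) 0).getD 0
  else
    (PySem.List.pyGet? ((PySem.List.pyGet? matriz 0).getD []) indice).getD 0

-- ===== PRECONDITION & SPEC =====
-- Pre_ excludes exactly the inputs where Python A raises IndexError: an empty matriz or an
-- out-of-range column index (in the first row always; in every row when modo is 'max'/'min',
-- since only then A's short-circuiting conditions index every row).
def Pre_buscar_valor_extremo (matriz : List (List Int)) (indice : Int) (modo : String) : Prop :=
  matriz ≠ [] ∧ PySem.Raise.InRange (matriz.headD []).length indice ∧
    ((modo = "max" ∨ modo = "min") → ∀ fila ∈ matriz, PySem.Raise.InRange fila.length indice)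
instance (matriz : List (List Int)) (indice : Int) (modo : String) : Decidable (Pre_buscar_valor_extremo matriz indice modo) := by unfold Pre_buscar_valor_extremo; infer_instance

def pvWitness_buscar_valor_extremo : List (List Int) × Int × String := ([[1, 7], [3, 4]], 1, "max")

def Spec_buscar_valor_extremo (matriz : List (List Int)) (indice : Int) (modo : String) (out : Int) : Prop := out = buscar_valor_extremo_alt matriz indice modo
instance (matriz : List (List Int)) (indice : Int) (modo : String) (out : Int) : Decidable (Spec_buscar_valor_extremo matriz indice modo out) := by unfold Spec_buscar_valor_extremo; infer_instance

-- ===== CLAIM (what is proved, stated in full; the proofs are below) =====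
def Claim_equal_buscar_valor_extremo : Prop := ∀ (matriz : List (List Int)) (indice : Int) (modo : String), Dom_buscar_valor_extremo matriz indice modo → Pre_buscar_valor_extremo matriz indice modo → Spec_buscar_valor_extremo matriz indice modo (buscar_valor_extremo matriz indice modo)

-- ===== LEMMAS AND PROOFS =====

-- A's strict-> (resp. strict-<) update is max (resp. min).
lemma step_eq_max (v x : Int) : (if x > v then x else v) = max v x := by
  rcases le_or_gt x v with h | h <;> simp [max_def] <;> omega

lemma step_eq_min (v x : Int) : (if x < v then x else v) = min v x := by
  rcases le_or_gt v x with h | h <;> simp [min_def] <;> omega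

-- A's running extreme is one of the scanned values.
lemma foldl_max_mem (l : List Int) : ∀ v : Int, l.foldl max v ∈ v :: l := by
  induction l with
  | nil => simp
  | cons x t ih =>
    intro v
    rw [List.foldl_cons]
    have h := ih (max v x)
    rw [List.mem_cons] at h
    rcases h with h | h
    · rw [h]; rcases max_choice v x with hm | hm <;> simp [hm]
    · simp [h]

lemma foldl_min_mem (l : List Int) : ∀ v : Int, l.foldl min v ∈ v :: l := by
  induction l with
  | nil => simp
  | cons x t ih =>
    intro v
    rw [List.foldl_cons]
    have h := ih (min v x)
    rw [List.mem_cons] at h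
    rcases h with h | h
    · rw [h]; rcases min_choice v x with hm | hm <;> simp [hm]
    · simp [h]

-- A's running min is a lower bound of the scanned values (max twin is PySem.List.le_foldl_max).
lemma foldl_min_le (l : List Int) : ∀ v : Int, ∀ y ∈ v :: l, l.foldl min v ≤ y := by
  induction l with
  | nil => intro v y hy; simp at hy; simp [hy]
  | cons x t ih =>
    intro v y hy
    rw [List.foldl_cons]
    have hhead : t.foldl min (min v x) ≤ min v x := ih (min v x) _ (by simp)
    simp only [List.mem_cons] at hy
    rcases hy with rfl | rfl | h
    · exact le_trans hhead (min_le_left _ _)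
    · exact le_trans hhead (min_le_right _ _)
    · exact ih (min v x) y (List.mem_cons.2 (Or.inr h))

-- With an invalid modo A's loop keeps its initial value.
lemma foldl_keep (t : List (List Int)) : ∀ (v : Int), t.foldl (fun w _ => w) v = v := by
  induction t with
  | nil => intro v; rfl
  | cons f t ih => intro v; exact ih v

-- ===== VERDICT (by name: the statement is the Claim_ definition above) =====
theorem buscar_valor_extremo_spec : Claim_equal_buscar_valor_extremo := by
  intro matriz indice modo hdom hpre
  obtain ⟨hne, -, -⟩ := hpre
  obtain ⟨h, t, rfl⟩ := List.exists_cons_of_ne_nil hne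
  clear hdom hne
  unfold Spec_buscar_valor_extremo buscar_valor_extremo buscar_valor_extremo_alt
  set f : List Int → Int := fun fila => (PySem.List.pyGet? fila indice).getD 0 with hf
  rw [show (PySem.List.pyGet? ((PySem.List.pyGet? (h :: t) 0).getD []) indice).getD 0
        = f h by simp [PySem.List.pyGet?, PySem.List.pyIdx?, hf]]
  set l : List Int := (h :: t).map f with hl
  have hlpos : 0 < l.length := by simp [hl]
  set s := PySem.List.sorted l (fun x => x) false with hs
  have hslen : s.length = l.length := PySem.List.length_sorted ..
  have hmem : ∀ y : Int, y ∈ s ↔ y ∈ l := fun y => PySem.List.mem_sorted ..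
  have hstep : ∀ (v : Int) (fila : List Int),
      (if f fila > v then f fila else v) = max v (f fila) := fun v fila => step_eq_max v (f fila)
  by_cases hmax : modo = "max"
  · subst hmax
    simp only [String.reduceEq, false_and, if_false, true_and, if_true, gt_iff_lt]
    -- A computes foldl max over the column l
    have ha : (h :: t).foldl (fun v fila => if v < f fila then f fila else v) (f h)
        = l.foldl max (f h) := by
      rw [hl, List.foldl_map]
      congr 1
      funext v fila
      exact step_eq_max v (f fila)
    rw [ha]
    -- bounds on the fold
    obtain ⟨hself, hub⟩ := PySem.List.le_foldl_max l (f h)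
    have hMmem : l.foldl max (f h) ∈ l := by
      have := foldl_max_mem l (f h)
      rw [List.mem_cons] at this
      rcases this with hE | hE
      · rw [hE]; simp [hl]
      · exact hE
    -- B picks s[-1] = s[len-1]
    have hn1 : s.length - 1 < s.length := by omega
    have hidx : PySem.List.pyIdx? s.length (-1) = some (s.length - 1) := by
      simp only [PySem.List.pyIdx?]
      rw [if_neg (by norm_num), if_pos (by omega)]
      norm_num
    have hgets : PySem.List.pyGet? s (-1) = some (s[s.length - 1]'hn1) := by
      simp [PySem.List.pyGet?, hidx, List.getElem?_eq_getElem hn1]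
    rw [hgets]
    simp only [Option.getD_some]
    -- antisymmetry
    have h1 : s[s.length - 1]'hn1 ≤ l.foldl max (f h) := by
      have : s[s.length - 1]'hn1 ∈ l := (hmem _).mp (List.getElem_mem hn1)
      rcases List.mem_map.mp (by rw [hl] at this; exact this) with ⟨fila, hfm, hfe⟩
      rw [← hfe]
      exact hub _ (by rw [hl]; exact List.mem_map_of_mem hfm)
    have h2 : l.foldl max (f h) ≤ s[s.length - 1]'hn1 := by
      obtain ⟨j, hj, hje⟩ := List.getElem_of_mem ((hmem _).mpr hMmem)
      rw [← hje]
      exact PySem.List.sorted_id_getElem_mono l (by omega) hn1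
    omega
  · by_cases hmin : modo = "min"
    · subst hmin
      simp only [String.reduceEq, false_and, if_false, true_and, if_true]
      have ha : (h :: t).foldl (fun v fila => if f fila < v then f fila else v) (f h)
          = l.foldl min (f h) := by
        rw [hl, List.foldl_map]
        congr 1
        funext v fila
        exact step_eq_min v (f fila)
      rw [ha]
      have hlb : ∀ y ∈ l, l.foldl min (f h) ≤ y := by
        intro y hy
        exact foldl_min_le l (f h) y (List.mem_cons.2 (Or.inr hy))
      have hMmem : l.foldl min (f h) ∈ l := by
        have := foldl_min_mem l (f h)
        rw [List.mem_cons] at this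
        rcases this with hE | hE
        · rw [hE]; simp [hl]
        · exact hE
      have hsne : s ≠ [] := by
        intro hnil
        have hle := (PySem.List.sorted_eq_nil_iff l (fun x => x) false).mp hnil
        rw [hle] at hlpos
        simp at hlpos
      obtain ⟨m, ts, hcons⟩ := List.exists_cons_of_ne_nil hsne
      rw [hcons,
        show PySem.List.pyGet? (m :: ts) 0 = some m by
          simp [PySem.List.pyGet?, PySem.List.pyIdx?]]
      simp only [Option.getD_some]
      have hhead_le : ∀ y ∈ l, m ≤ y :=
        PySem.List.key_head_sorted_le l (fun x => x) (by rw [← hs]; exact hcons)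
      have h1 : m ≤ l.foldl min (f h) := hhead_le _ hMmem
      have h2 : l.foldl min (f h) ≤ m := by
        have hm : m ∈ l := (hmem m).mp (by rw [hcons]; exact List.mem_cons_self ..)
        exact hlb _ hm
      omega
    · simp only [hmax, hmin, false_and, if_false]
      exact foldl_keep (h :: t) (f h)
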